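-- pv_equiv track=rewrite | github.com/gayathriv-stitchflow/demo-booking-reports-for-slack | report.py | campaign_breakdown
-- ===== SOURCE A (Python) =====
-- from collections import defaultdict
--
-- def campaign_breakdown(outbound_rows, active_campaigns=None):
--     """
--     Per-campaign summary lines.
--     Shows campaigns that produced demos first, then active campaigns with 0 demos.
--     active_campaigns: list of campaign names currently Active in Instantly.
--     """
--     buckets = defaultdict(list)
--     for r in outbound_rows:
--         buckets[r["source_detail"]].append(r)
--
--     lines = []
--     # Campaigns that produced demos this period
--     for name, cr in sorted(buckets.items(), key=lambda x: -len(x[1])):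
--         cs = sum(1 for r in cr if r["outcome"] == "showed")
--         lines.append(f"   📣 *{name}*   {len(cr)} booked  ·  {cs} showed")
--
--     # Active campaigns with 0 demos this period
--     if active_campaigns:
--         for name in active_campaigns:
--             if name not in buckets:
--                 lines.append(f"   📣 *{name}*   0 bookings this period")
--
--     return lines
-- ===== SOURCE B (Python) =====
-- def campaign_breakdown(outbound_rows, active_campaigns=None):
--     """
--     Per-campaign summary lines.
--     Shows campaigns that produced demos first, then active campaigns with 0 demos.
--     """
--     counts = {}
--     for r in outbound_rows:
--         name = r["source_detail"]
--         b, s = counts.get(name, (0, 0))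
--         counts[name] = (b + 1, s + (1 if r["outcome"] == "showed" else 0))
--
--     lines = [f"   📣 *{name}*   {b} booked  ·  {s} showed"
--              for name, (b, s) in sorted(counts.items(), key=lambda kv: -kv[1][0])]
--
--     if active_campaigns:
--         lines.extend(f"   📣 *{name}*   0 bookings this period"
--                      for name in active_campaigns if name not in counts)
--     return lines
-- ===== Notes on version B (the rewrite author's own statement) =====
-- stated objective: simpler
-- what changed: B replaces A's dict of full row lists (which is re-scanned per campaign to count shows) by a single dict mapping campaign name to a (booked, showed) pair maintained in one pass, and emits the lines by mapping over the sorted count items.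
import Mathlib
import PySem

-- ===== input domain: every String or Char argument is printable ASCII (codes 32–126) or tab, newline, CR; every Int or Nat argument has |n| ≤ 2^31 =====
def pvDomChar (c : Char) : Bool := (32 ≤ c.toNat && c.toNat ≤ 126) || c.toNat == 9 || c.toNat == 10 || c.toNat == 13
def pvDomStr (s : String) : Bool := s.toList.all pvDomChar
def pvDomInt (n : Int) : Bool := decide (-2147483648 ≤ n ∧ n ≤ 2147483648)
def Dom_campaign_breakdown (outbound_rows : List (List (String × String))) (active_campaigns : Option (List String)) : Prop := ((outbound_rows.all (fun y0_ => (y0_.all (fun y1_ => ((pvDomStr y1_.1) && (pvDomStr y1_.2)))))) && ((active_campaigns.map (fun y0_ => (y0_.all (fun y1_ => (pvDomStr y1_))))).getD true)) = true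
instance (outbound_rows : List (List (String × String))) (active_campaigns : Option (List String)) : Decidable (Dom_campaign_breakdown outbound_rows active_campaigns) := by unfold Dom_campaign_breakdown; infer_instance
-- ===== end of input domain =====

-- B replaces A's buckets of full row-lists by a single dict of (booked, showed) count pairs built in one pass (simpler bookkeeping, same output).


-- ===== PORT A =====
-- r["k"] on a Python dict row; under Pre_ the key is present, so getD's default is never the value used.
def pvRowGet (r : List (String × String)) (k : String) : String :=
  (PySem.Dict.mk r).getD k ""

-- the two dicts the ports build
def pvBuckets (rows : List (List (String × String))) : PySem.Dict String (List (List (String × String))) :=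
  rows.foldl (fun d r => d.modify (pvRowGet r "source_detail") [] (fun l => l ++ [r])) PySem.Dict.empty
def pvCounts (rows : List (List (String × String))) : PySem.Dict String (Int × Int) :=
  rows.foldl
    (fun d r =>
      let bs := d.getD (pvRowGet r "source_detail") ((0 : Int), (0 : Int))
      d.insert (pvRowGet r "source_detail")
        (bs.1 + 1, bs.2 + (if pvRowGet r "outcome" == "showed" then (1 : Int) else 0)))
    PySem.Dict.empty


def pvLine1 (name : String) (b s : Int) : String :=
  "   📣 *" ++ name ++ "*   " ++ PySem.Int.toStr b ++ " booked  ·  " ++ PySem.Int.toStr s ++ " showed"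

def pvLine0 (name : String) : String :=
  "   📣 *" ++ name ++ "*   0 bookings this period"

def campaign_breakdown (outbound_rows : List (List (String × String))) (active_campaigns : Option (List String)) : List String :=
  let buckets := pvBuckets outbound_rows
  let lines := (PySem.List.sorted buckets.items (fun x => -((x.2.length : Int))) false).foldl
    (fun ls p =>
      let cs := p.2.foldl (fun acc r => if pvRowGet r "outcome" == "showed" then acc + 1 else acc) (0 : Int)
      ls ++ [pvLine1 p.1 (p.2.length : Int) cs]) []
  match active_campaigns with
  | none => lines
  | some acs =>
    if acs.isEmpty then lines
    else acs.foldl (fun ls n => if !(buckets.contains n) then ls ++ [pvLine0 n] else ls) lines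

-- ===== PORT B =====
def campaign_breakdown_alt (outbound_rows : List (List (String × String))) (active_campaigns : Option (List String)) : List String :=
  let counts := pvCounts outbound_rows
  let lines := (PySem.List.sorted counts.items (fun kv => -kv.2.1) false).map
    (fun kv => pvLine1 kv.1 kv.2.1 kv.2.2)
  match active_campaigns with
  | none => lines
  | some acs =>
    if acs.isEmpty then lines
    else lines ++ (acs.filter (fun n => !(counts.contains n))).map pvLine0

-- ===== PRECONDITION & SPEC =====
-- Pre_ excludes exactly the rows on which Python A raises KeyError: a row missing the
-- "source_detail" or "outcome" key.
def Pre_campaign_breakdown (outbound_rows : List (List (String × String))) (active_campaigns : Option (List String)) : Prop :=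
  ∀ r ∈ outbound_rows,
    (PySem.Dict.mk r).contains "source_detail" = true ∧ (PySem.Dict.mk r).contains "outcome" = true

instance (outbound_rows : List (List (String × String))) (active_campaigns : Option (List String)) : Decidable (Pre_campaign_breakdown outbound_rows active_campaigns) := by unfold Pre_campaign_breakdown; infer_instance

def pvWitness_campaign_breakdown : (List (List (String × String))) × Option (List String) :=
  ([[("source_detail", "launch"), ("outcome", "showed")],
    [("source_detail", "retarget"), ("outcome", "no_show")],
    [("source_detail", "launch"), ("outcome", "booked")]],
   some ["launch", "cold"])

def Spec_campaign_breakdown (outbound_rows : List (List (String × String))) (active_campaigns : Option (List String)) (out : List String) : Prop := out = campaign_breakdown_alt outbound_rows active_campaigns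
instance (outbound_rows : List (List (String × String))) (active_campaigns : Option (List String)) (out : List String) : Decidable (Spec_campaign_breakdown outbound_rows active_campaigns out) := by unfold Spec_campaign_breakdown; infer_instance

-- ===== CLAIM (what is proved, stated in full; the proofs are below) =====
def Claim_equal_campaign_breakdown : Prop := ∀ (outbound_rows : List (List (String × String))) (active_campaigns : Option (List String)), Dom_campaign_breakdown outbound_rows active_campaigns → Pre_campaign_breakdown outbound_rows active_campaigns → Spec_campaign_breakdown outbound_rows active_campaigns (campaign_breakdown outbound_rows active_campaigns)

-- ===== LEMMAS AND PROOFS =====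

-- proof-side abbreviations
def pvKey (r : List (String × String)) : String := pvRowGet r "source_detail"
def pvShowed (r : List (String × String)) : Bool := pvRowGet r "outcome" == "showed"
def pvFlt (rows : List (List (String × String))) (c : String) : List (List (String × String)) :=
  rows.filter (fun r => pvKey r == c)
def pvCnt (cr : List (List (String × String))) : Int := ((cr.filter pvShowed).length : Int)
def pvG (p : String × List (List (String × String))) : String × (Int × Int) :=
  (p.1, ((p.2.length : Int), pvCnt p.2))

lemma pvBuckets_keys (rows : List (List (String × String))) :
    (pvBuckets rows).keys = PySem.Set.ofList (rows.map pvKey) := by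
  have h := PySem.Dict.keys_foldl_modify_key rows pvKey []
    (fun _ r l => l ++ [r]) PySem.Dict.empty
  simpa [pvBuckets, pvKey, PySem.Dict.keys_empty, PySem.Set.update_nil_left] using h

lemma pvCounts_keys (rows : List (List (String × String))) :
    (pvCounts rows).keys = PySem.Set.ofList (rows.map pvKey) := by
  have h := PySem.Dict.keys_foldl_insert_key rows pvKey
    (fun d r =>
      ((d.getD (pvKey r) ((0 : Int), (0 : Int))).1 + 1,
       (d.getD (pvKey r) ((0 : Int), (0 : Int))).2 +
         (if pvRowGet r "outcome" == "showed" then (1 : Int) else 0)))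
    PySem.Dict.empty
  simpa [pvCounts, pvKey, PySem.Dict.keys_empty, PySem.Set.update_nil_left] using h

lemma pvBuckets_nodup (rows : List (List (String × String))) : (pvBuckets rows).keys.Nodup := by
  have h := PySem.Dict.nodup_keys_foldl_modify_key rows pvKey []
    (fun _ r l => l ++ [r]) PySem.Dict.empty (by simp [PySem.Dict.keys_empty])
  simpa [pvBuckets, pvKey] using h

lemma pvCounts_nodup (rows : List (List (String × String))) : (pvCounts rows).keys.Nodup := by
  have h := PySem.Dict.nodup_keys_foldl_insert_key rows pvKey
    (fun d r =>
      ((d.getD (pvKey r) ((0 : Int), (0 : Int))).1 + 1,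
       (d.getD (pvKey r) ((0 : Int), (0 : Int))).2 +
         (if pvRowGet r "outcome" == "showed" then (1 : Int) else 0)))
    PySem.Dict.empty (by simp [PySem.Dict.keys_empty])
  simpa [pvCounts, pvKey] using h

lemma pvBuckets_getD (rows : List (List (String × String))) (c : String) :
    (pvBuckets rows).getD c [] = pvFlt rows c := by
  have h := PySem.Dict.getD_foldl_modify_append
    (rows.map (fun r => (pvKey r, r))) PySem.Dict.empty c
  rw [List.foldl_map] at h
  simpa [pvBuckets, pvFlt, pvKey, List.filter_map, Function.comp_def, List.map_id, List.map_map] using h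

lemma pvCnt_cons (r : List (String × String)) (l : List (List (String × String))) :
    pvCnt (r :: l) = (if pvShowed r then (1 : Int) else 0) + pvCnt l := by
  by_cases h : pvShowed r <;> simp [pvCnt, h] <;> ring

lemma pvCounts_getD_aux :
    ∀ (rows : List (List (String × String))) (d : PySem.Dict String (Int × Int)) (c : String),
    (rows.foldl
      (fun d r =>
        let bs := d.getD (pvRowGet r "source_detail") ((0 : Int), (0 : Int))
        d.insert (pvRowGet r "source_detail")
          (bs.1 + 1, bs.2 + (if pvRowGet r "outcome" == "showed" then (1 : Int) else 0)))
      d).getD c ((0 : Int), (0 : Int))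
      = ((d.getD c ((0 : Int), (0 : Int))).1 + ((pvFlt rows c).length : Int),
         (d.getD c ((0 : Int), (0 : Int))).2 + pvCnt (pvFlt rows c)) := by
  intro rows
  induction rows with
  | nil => intro d c; simp [pvFlt, pvCnt]
  | cons r t ih =>
    intro d c
    rw [List.foldl_cons, ih]
    by_cases h : pvKey r = c
    · have hk : pvRowGet r "source_detail" = c := h
      rw [hk, PySem.Dict.getD_insert_self]
      have hf : pvFlt (r :: t) c = r :: pvFlt t c := by
        simp [pvFlt, h]
      rw [hf, pvCnt_cons]
      simp only [List.length_cons, Prod.mk.injEq, pvShowed]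
      constructor
      · push_cast; ring
      · split_ifs <;> ring
    · have hk : c ≠ pvRowGet r "source_detail" := fun he => h he.symm
      rw [PySem.Dict.getD_insert_of_ne _ _ _ hk]
      have hf : pvFlt (r :: t) c = pvFlt t c := by
        simp [pvFlt, h]
      rw [hf]

lemma pvCounts_getD (rows : List (List (String × String))) (c : String) :
    (pvCounts rows).getD c ((0 : Int), (0 : Int))
      = (((pvFlt rows c).length : Int), pvCnt (pvFlt rows c)) := by
  have h := pvCounts_getD_aux rows PySem.Dict.empty c
  simpa [pvCounts, PySem.Dict.getD_empty] using h

lemma pvItems_map (rows : List (List (String × String))) :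
    (pvCounts rows).items = (pvBuckets rows).items.map pvG := by
  rw [PySem.Dict.items_eq_map_keys (pvCounts rows) (pvCounts_nodup rows) ((0 : Int), (0 : Int)),
      PySem.Dict.items_eq_map_keys (pvBuckets rows) (pvBuckets_nodup rows) [],
      pvCounts_keys, pvBuckets_keys, List.map_map]
  refine List.map_congr_left ?_
  intro k _
  simp [Function.comp, pvG, pvCounts_getD, pvBuckets_getD]

lemma pvInsertBy_map {α β : Type} (g : α → β) (key : β → Int) (x : α) (ys : List α) :
    PySem.List.insertBy (fun a b => decide (key a < key b)) (g x) (ys.map g)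
      = (PySem.List.insertBy (fun a b => decide (key (g a) < key (g b))) x ys).map g := by
  induction ys with
  | nil => simp [PySem.List.insertBy]
  | cons y t ih => simp only [List.map_cons, PySem.List.insertBy]; split_ifs <;> simp [ih]

lemma pvSorted_map {α β : Type} (g : α → β) (key : β → Int) (xs : List α) :
    PySem.List.sorted (xs.map g) key false
      = (PySem.List.sorted xs (fun a => key (g a)) false).map g := by
  rw [PySem.List.sorted_eq_foldl_insertBy, PySem.List.sorted_eq_foldl_insertBy, List.foldl_map]
  suffices h : ∀ (acc : List α),
      List.foldl (fun acc x => PySem.List.insertBy (fun a b => decide (key a < key b)) (g x) acc) (acc.map g) xs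
        = (List.foldl (fun acc x => PySem.List.insertBy (fun a b => decide (key (g a) < key (g b))) x acc) acc xs).map g by
    simpa using h []
  induction xs with
  | nil => intro acc; simp
  | cons x t ih =>
    intro acc
    simp only [List.foldl_cons]
    rw [pvInsertBy_map g key x acc]
    exact ih _

lemma pvLines_eq (rows : List (List (String × String))) :
    (PySem.List.sorted (pvBuckets rows).items (fun x => -((x.2.length : Int))) false).foldl
      (fun ls p =>
        ls ++ [pvLine1 p.1 (p.2.length : Int)
          (p.2.foldl (fun acc r => if pvRowGet r "outcome" == "showed" then acc + 1 else acc) (0 : Int))]) []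
      = (PySem.List.sorted (pvCounts rows).items (fun kv => -kv.2.1) false).map
          (fun kv => pvLine1 kv.1 kv.2.1 kv.2.2) := by
  rw [pvItems_map, pvSorted_map pvG (fun kv => -kv.2.1), List.map_map]
  have hkey : (fun a => -(pvG a).2.1) = (fun x : String × List (List (String × String)) => -((x.2.length : Int))) := by
    funext a; simp [pvG]
  rw [hkey,
    PySem.List.foldl_append_singleton_eq_map
      (fun p : String × List (List (String × String)) =>
        pvLine1 p.1 (p.2.length : Int)
          (p.2.foldl (fun acc r => if pvRowGet r "outcome" == "showed" then acc + 1 else acc) (0 : Int)))]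
  simp only [List.nil_append]
  refine List.map_congr_left ?_
  intro p _
  rw [PySem.List.foldl_count_if]
  simp only [Function.comp, pvG, pvCnt, List.countP_eq_length_filter, zero_add]
  rfl

lemma pvContains_eq (rows : List (List (String × String))) (n : String) :
    (pvCounts rows).contains n = (pvBuckets rows).contains n := by
  rw [PySem.Dict.contains_eq_decide_mem_keys, PySem.Dict.contains_eq_decide_mem_keys,
      pvCounts_keys, pvBuckets_keys]

-- ===== VERDICT (by name: the statement is the Claim_ definition above) =====
theorem campaign_breakdown_spec : Claim_equal_campaign_breakdown := by
  intro rows ac _ _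
  show campaign_breakdown rows ac = campaign_breakdown_alt rows ac
  cases ac with
  | none =>
    simp only [campaign_breakdown, campaign_breakdown_alt]
    exact pvLines_eq rows
  | some acs =>
    simp only [campaign_breakdown, campaign_breakdown_alt]
    rw [pvLines_eq rows]
    by_cases he : acs.isEmpty = true
    · rw [if_pos he, if_pos he]
    · rw [if_neg he, if_neg he,
        PySem.List.foldl_append_if (fun n => !(pvBuckets rows).contains n) pvLine0 acs]
      congr 2
      congr 1
      funext n
      rw [pvContains_eq]
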